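-- pv_equiv track=rewrite | github.com/Darshansol9/GCC-Patch-1.0.2 | python/Question2.py | question02
-- ===== SOURCE A (Python) =====
-- def question02(risk, bonus, trader):
--     total_profit = 0
--     for t in range(0,len(trader)):
--         curr_profit = 0
--         for r in range(0,len(risk)):
--             if(trader[t] < risk[r]):
--                 continue
--             else:
--                 if(curr_profit < bonus[r]):
--                     curr_profit = bonus[r]
--
--         total_profit += curr_profit
--
--     # modify and then return the variable below
--
--     return total_profit
-- ===== SOURCE B (Python) =====
-- def question02(risk, bonus, trader):
--     pairs = sorted(zip(risk, bonus), key=lambda p: p[0])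
--     total = 0
--     best = 0
--     i = 0
--     n = len(pairs)
--     for t in sorted(trader):
--         while i < n and pairs[i][0] <= t:
--             if pairs[i][1] > best:
--                 best = pairs[i][1]
--             i += 1
--         total += best
--     return total
-- ===== Notes on version B (the rewrite author's own statement) =====
-- stated objective: faster
-- what changed: Instead of scanning all risks for every trader, B sorts the (risk,bonus) pairs by risk and the traders ascending, then one merge sweep with a running max of affordable bonuses gives each trader's contribution.
import Mathlib
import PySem

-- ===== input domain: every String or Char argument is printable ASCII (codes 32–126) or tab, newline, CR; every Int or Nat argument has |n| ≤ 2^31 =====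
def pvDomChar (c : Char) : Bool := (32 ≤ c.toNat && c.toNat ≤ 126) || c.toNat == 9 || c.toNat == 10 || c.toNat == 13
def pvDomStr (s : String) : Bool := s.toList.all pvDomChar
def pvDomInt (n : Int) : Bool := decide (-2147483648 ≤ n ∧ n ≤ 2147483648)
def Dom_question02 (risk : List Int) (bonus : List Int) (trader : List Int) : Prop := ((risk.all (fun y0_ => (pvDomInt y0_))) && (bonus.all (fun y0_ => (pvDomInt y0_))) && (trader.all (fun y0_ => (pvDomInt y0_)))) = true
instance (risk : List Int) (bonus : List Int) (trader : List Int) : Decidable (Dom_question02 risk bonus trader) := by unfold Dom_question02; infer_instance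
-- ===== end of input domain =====

-- B replaces A's per-trader scan of all risks by sorting pairs and traders and one merge sweep (asymptotically faster; return value only, no mutation).


-- ===== PORT A =====
def question02 (risk : List Int) (bonus : List Int) (trader : List Int) : Int :=
  (PySem.List.pyRange 0 (trader.length : Int) 1).foldl
    (fun total_profit t =>
      total_profit +
        (PySem.List.pyRange 0 (risk.length : Int) 1).foldl
          (fun curr_profit r =>
            if PySem.List.pyGetD trader t 0 < PySem.List.pyGetD risk r 0 then
              curr_profit
            else
              if curr_profit < PySem.List.pyGetD bonus r 0 then PySem.List.pyGetD bonus r 0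
              else curr_profit)
          0)
    0

-- ===== PORT B =====
-- the inner 'while i < n and pairs[i][0] <= t' loop: consume the affordable prefix, updating the running best
def q2Advance (t : Int) : List (Int × Int) → Int → (List (Int × Int) × Int)
  | [], best => ([], best)
  | (r, b) :: rest, best =>
      if r ≤ t then q2Advance t rest (if b > best then b else best)
      else ((r, b) :: rest, best)

-- the 'for t in sorted(trader)' loop, state (remaining pairs, best, total)
def q2Sweep : List Int → List (Int × Int) → Int → Int → Int
  | [], _, _, total => total
  | t :: ts, ps, best, total =>
      let s := q2Advance t ps best
      q2Sweep ts s.1 s.2 (total + s.2)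

def question02_alt (risk : List Int) (bonus : List Int) (trader : List Int) : Int :=
  q2Sweep (PySem.List.sorted trader (fun x => x) false)
          (PySem.List.sorted (risk.zip bonus) (fun p => p.1) false) 0 0

-- ===== PRECONDITION & SPEC =====
-- Pre_ excludes exactly the inputs where A raises IndexError: an unpaired risk (index ≥ len bonus) that some trader can afford.
def Pre_question02 (risk : List Int) (bonus : List Int) (trader : List Int) : Prop :=
  ∀ k, k < risk.length → bonus.length ≤ k → ∀ t ∈ trader, t < risk.getD k 0
instance (risk : List Int) (bonus : List Int) (trader : List Int) : Decidable (Pre_question02 risk bonus trader) := by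
  unfold Pre_question02; infer_instance
def pvWitness_question02 : List Int × List Int × List Int := ([1, 4], [5, 2], [3, 0])

def Spec_question02 (risk : List Int) (bonus : List Int) (trader : List Int) (out : Int) : Prop := out = question02_alt risk bonus trader
instance (risk : List Int) (bonus : List Int) (trader : List Int) (out : Int) : Decidable (Spec_question02 risk bonus trader out) := by unfold Spec_question02; infer_instance

-- ===== CLAIM (what is proved, stated in full; the proofs are below) =====
def Claim_equal_question02 : Prop := ∀ (risk : List Int) (bonus : List Int) (trader : List Int), Dom_question02 risk bonus trader → Pre_question02 risk bonus trader → Spec_question02 risk bonus trader (question02 risk bonus trader)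

-- ===== LEMMAS AND PROOFS =====

-- the shared per-trader step: skip unaffordable pairs, take the max bonus otherwise
def q2Step (t : Int) (cp : Int) (p : Int × Int) : Int :=
  if t < p.1 then cp else if cp < p.2 then p.2 else cp

theorem q2Step_rightComm (t : Int) : RightCommutative (q2Step t) := by
  constructor
  intro b p q
  simp only [q2Step]
  split_ifs <;> omega

-- A's inner index loop equals a fold of q2Step over the zip, given no affordable unpaired risk
theorem innerA_eq (risk bonus : List Int) (tv : Int)
    (H : ∀ k, k < risk.length → bonus.length ≤ k → tv < risk.getD k 0) :
    (PySem.List.pyRange 0 (risk.length : Int) 1).foldl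
      (fun curr_profit r =>
        if tv < PySem.List.pyGetD risk r 0 then curr_profit
        else if curr_profit < PySem.List.pyGetD bonus r 0 then PySem.List.pyGetD bonus r 0
        else curr_profit) 0
    = (risk.zip bonus).foldl (q2Step tv) 0 := by
  rw [PySem.List.pyRange_one]
  simp only [Int.toNat_natCast, zero_add, List.foldl_map, PySem.List.pyGetD_natCast,
    Int.sub_zero]
  have key : ∀ n, n ≤ risk.length → ∀ c : Int,
      (List.range n).foldl
        (fun cp (k : Nat) =>
          if tv < risk.getD k 0 then cp
          else if cp < bonus.getD k 0 then bonus.getD k 0 else cp) c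
      = ((risk.zip bonus).take n).foldl (q2Step tv) c := by
    intro n
    induction n with
    | zero => intro _ c; simp
    | succ m ih =>
      intro hm c
      rw [List.range_succ, List.foldl_append, ih (by omega)]
      by_cases hb : m < bonus.length
      · have hz : m < (risk.zip bonus).length := by simp [List.length_zip]; omega
        have : (risk.zip bonus).take (m + 1) = (risk.zip bonus).take m ++ [(risk.zip bonus)[m]] := by
          rw [List.take_add_one]; simp [List.getElem?_eq_getElem hz]
        rw [this, List.foldl_append]
        simp only [List.foldl_cons, List.foldl_nil, q2Step, List.getElem_zip]
        rw [List.getD_eq_getElem risk 0 (by omega), List.getD_eq_getElem bonus 0 hb]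
      · have ht : tv < risk.getD m 0 := H m (by omega) (by omega)
        have : (risk.zip bonus).take (m + 1) = (risk.zip bonus).take m := by
          rw [List.take_of_length_le, List.take_of_length_le] <;> simp [List.length_zip] <;> omega
        rw [this]
        simp only [List.foldl_cons, List.foldl_nil, if_pos ht]
  have := key risk.length le_rfl 0
  rw [this, List.take_of_length_le (by simp [List.length_zip])]

-- specification of the while loop: it splits off the maximal affordable prefix and folds the running max over it
theorem q2Advance_spec (t : Int) :
    ∀ (ps : List (Int × Int)) (best : Int), ps.Pairwise (fun p q => p.1 ≤ q.1) →
    ∃ P Q, ps = P ++ Q ∧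
      q2Advance t ps best = (Q, P.foldl (fun m p => if p.2 > m then p.2 else m) best) ∧
      (∀ p ∈ P, p.1 ≤ t) ∧ (∀ q ∈ Q, t < q.1) := by
  intro ps
  induction ps with
  | nil => intro best _; exact ⟨[], [], rfl, rfl, by simp, by simp⟩
  | cons hd tl ih =>
    intro best hpw
    obtain ⟨r, b⟩ := hd
    rw [List.pairwise_cons] at hpw
    by_cases hr : r ≤ t
    · obtain ⟨P, Q, hsplit, heq, hP, hQ⟩ := ih (if b > best then b else best) hpw.2
      refine ⟨(r, b) :: P, Q, by simp [hsplit], ?_, ?_, hQ⟩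
      · simp only [q2Advance, if_pos hr, List.foldl_cons]
        exact heq
      · intro p hp
        rcases List.mem_cons.mp hp with h | h
        · subst h; exact hr
        · exact hP p h
    · refine ⟨[], (r, b) :: tl, rfl, ?_, by simp, ?_⟩
      · simp only [q2Advance, if_neg hr, List.foldl_nil]
      · intro q hq
        rcases List.mem_cons.mp hq with h | h
        · subst h; omega
        · have := hpw.1 q h; omega

-- q2Step over a fully-affordable list is the plain running max update
theorem foldl_q2Step_affordable (t : Int) (P : List (Int × Int)) (hP : ∀ p ∈ P, p.1 ≤ t) :
    ∀ c : Int, P.foldl (q2Step t) c = P.foldl (fun m p => if p.2 > m then p.2 else m) c := by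
  induction P with
  | nil => intro c; rfl
  | cons hd tl ih =>
    intro c
    have h1 : hd.1 ≤ t := hP hd (by simp)
    simp only [List.foldl_cons, q2Step, if_neg (by omega : ¬ t < hd.1)]
    rw [ih (fun p hp => hP p (by simp [hp]))]

-- and over a fully-unaffordable list it does nothing
theorem foldl_q2Step_unaffordable (t : Int) (Q : List (Int × Int)) (hQ : ∀ q ∈ Q, t < q.1) :
    ∀ c : Int, Q.foldl (q2Step t) c = c := by
  induction Q with
  | nil => intro c; rfl
  | cons hd tl ih =>
    intro c
    simp only [List.foldl_cons, q2Step, if_pos (hQ hd (by simp))]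
    exact ih (fun q hq => hQ q (by simp [hq])) c

-- the main sweep invariant: on sorted pairs and sorted traders, the sweep sums the per-trader folds
theorem q2Sweep_spec :
    ∀ (ts : List Int) (ps : List (Int × Int)) (best total : Int),
    ps.Pairwise (fun p q => p.1 ≤ q.1) → ts.Pairwise (· ≤ ·) →
    q2Sweep ts ps best total = total + (ts.map (fun t => ps.foldl (q2Step t) best)).sum := by
  intro ts
  induction ts with
  | nil => intro ps best total _ _; simp [q2Sweep]
  | cons t ts' ih =>
    intro ps best total hps hts
    rw [List.pairwise_cons] at hts
    obtain ⟨P, Q, hsplit, heq, hP, hQ⟩ := q2Advance_spec t ps best hps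
    have hQpw : Q.Pairwise (fun p q => p.1 ≤ q.1) := by
      rw [hsplit, List.pairwise_append] at hps; exact hps.2.1
    set best' := P.foldl (fun m p => if p.2 > m then p.2 else m) best with hb
    have hcontr : ps.foldl (q2Step t) best = best' := by
      rw [hsplit, List.foldl_append, foldl_q2Step_affordable t P hP,
        foldl_q2Step_unaffordable t Q hQ]
    have hrest : ∀ t' ∈ ts', ps.foldl (q2Step t') best = Q.foldl (q2Step t') best' := by
      intro t' ht'
      have htt' : t ≤ t' := hts.1 t' ht'
      rw [hsplit, List.foldl_append, foldl_q2Step_affordable t' P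
        (fun p hp => le_trans (hP p hp) htt')]
    simp only [q2Sweep, heq]
    rw [ih Q best' (total + best') hQpw hts.2]
    simp only [List.map_cons, List.sum_cons, hcontr]
    rw [List.map_congr_left hrest]
    ring

-- A as a fold of per-trader q2Step-folds over the zip
theorem questionA_eq (risk bonus trader : List Int) (hpre : Pre_question02 risk bonus trader) :
    question02 risk bonus trader
      = trader.foldl (fun tot t => tot + (risk.zip bonus).foldl (q2Step t) 0) 0 := by
  unfold question02
  rw [PySem.List.foldl_pyRange_zero_pyGetD' trader 0
    (fun (acc tv : Int) => acc +
      (PySem.List.pyRange 0 (risk.length : Int) 1).foldl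
        (fun curr_profit r =>
          if tv < PySem.List.pyGetD risk r 0 then curr_profit
          else if curr_profit < PySem.List.pyGetD bonus r 0 then PySem.List.pyGetD bonus r 0
          else curr_profit) 0) 0]
  apply PySem.List.foldl_congr_mem
  intro acc t ht
  rw [innerA_eq risk bonus t (fun k hk hbk => hpre k hk hbk t ht)]

theorem question02_spec : Claim_equal_question02 := by
  intro risk bonus trader _ hpre
  unfold Spec_question02 question02_alt
  rw [questionA_eq risk bonus trader hpre]
  rw [q2Sweep_spec (PySem.List.sorted trader (fun x => x) false)
      (PySem.List.sorted (risk.zip bonus) (fun p => p.1) false) 0 0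
      (PySem.List.sorted_pairwise _ _) (PySem.List.sorted_pairwise trader (fun x => x))]
  rw [PySem.List.foldl_add]
  have hperm1 : (PySem.List.sorted trader (fun x => x) false).Perm trader :=
    PySem.List.sorted_perm trader _ false
  have hperm2 : (PySem.List.sorted (risk.zip bonus) (fun p => p.1) false).Perm (risk.zip bonus) :=
    PySem.List.sorted_perm (risk.zip bonus) _ false
  have hfold : ∀ t : Int,
      (PySem.List.sorted (risk.zip bonus) (fun p => p.1) false).foldl (q2Step t) 0
        = (risk.zip bonus).foldl (q2Step t) 0 := by
    intro t
    haveI : RightCommutative (q2Step t) := q2Step_rightComm t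
    exact hperm2.foldl_eq 0
  rw [List.map_congr_left (fun t _ => hfold t)]
  rw [(hperm1.map (fun t => (risk.zip bonus).foldl (q2Step t) 0)).sum_eq]
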